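-- pv_equiv track=rewrite | github.com/joojeehwan/algorithm_genius | Baekjoon/14890_경사로/hangjoon_14890.py | is_road
-- ===== SOURCE A (Python) =====
-- def is_road(lst, size, slide):
--     road = 0
--     cnt = 1  # 연속 평지 수
--     for i in range(size - 1):
--         if abs(lst[i] - lst[i + 1]) >= 2:  # 높이 차이가 큼
--             return 0
--         elif lst[i] == lst[i + 1]:  # 같은 높이
--             cnt += 1
--         else:  # 높이 차이가 1
--             if lst[i] < lst[i + 1]:  # 올라가기
--                 if cnt >= slide:  # 경사로 설치 가능
--                     cnt = 1
--                     continue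
--                 else:  # 불가능
--                     return 0
--             else:  # 내려가기
--                 if i + slide >= size:  # 맵 밖
--                     return 0
--                 if sum(lst[i + 1: i + 1 + slide]) // slide == lst[i + 1]:  # 설치 가능
--                     cnt = -slide + 1 # 이미 설치
--                     continue
--                 else:  # 공간 부족
--                     return 0
--
--     else:
--         road += 1
--     return road
-- ===== SOURCE B (Python) =====
-- def is_road(lst, size, slide):
--     # prefix sums: pre[k] = lst[0] + ... + lst[k-1]
--     pre = [0]
--     s = 0
--     for h in lst:
--         s += h
--         pre.append(s)
--     base = -1  # index of the step just before the usable flat run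
--     for i in range(size - 1):
--         d = lst[i + 1] - lst[i]
--         if d == 0:
--             continue
--         if d > 1 or d < -1:
--             return 0
--         if d == 1:  # uphill: need a flat run of length slide ending at i
--             if i - base >= slide:
--                 base = i
--             else:
--                 return 0
--         else:  # downhill: ramp occupies cells i+1 .. i+slide
--             if i + slide >= size:
--                 return 0
--             if (pre[i + 1 + slide] - pre[i + 1]) // slide == lst[i + 1]:
--                 base = i + slide
--             else:
--                 return 0
--     return 1
-- ===== Notes on version B (the rewrite author's own statement) =====
-- stated objective: alternative
-- what changed: B precomputes a prefix-sum array once so each downhill window sum is a subtraction instead of A's slice-and-sum, and tracks the last ramp position 'base' instead of A's running flat counter 'cnt'.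
-- outside the precondition, e.g. on is_road([1, 0], 2, -1): A returns 1, B returns 0; on is_road([3, 0], 5, 2): A returns 0, B returns 0
import Mathlib
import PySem

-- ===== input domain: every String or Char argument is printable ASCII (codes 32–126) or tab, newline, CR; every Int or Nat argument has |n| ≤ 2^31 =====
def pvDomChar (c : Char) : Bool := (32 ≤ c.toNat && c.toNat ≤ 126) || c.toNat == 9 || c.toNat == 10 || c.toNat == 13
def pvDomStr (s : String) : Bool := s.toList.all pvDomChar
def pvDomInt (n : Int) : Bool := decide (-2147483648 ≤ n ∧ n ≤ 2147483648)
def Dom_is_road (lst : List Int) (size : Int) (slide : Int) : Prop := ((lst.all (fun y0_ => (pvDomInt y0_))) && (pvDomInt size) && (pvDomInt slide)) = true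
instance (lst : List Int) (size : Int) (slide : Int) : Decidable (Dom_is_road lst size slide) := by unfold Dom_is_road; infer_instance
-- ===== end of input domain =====

-- B replaces A's inner slice-sum by a prefix-sum subtraction and tracks the last ramp
-- position 'base' instead of A's running flat counter 'cnt' (objective: alternative).

-- ===== PORT A =====
-- A's 'for i in range(size - 1)' with early returns: fuel = remaining iterations,
-- i the current index, cnt the running flat counter.  lst[i] is pyGet? with a
-- default that is never reached inside Pre_ (Python would raise IndexError there).
def isRoadGoA (lst : List Int) (size : Int) (slide : Int) : Nat → Int → Int → Int
  | 0, _, _ => 1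
  | n + 1, i, cnt =>
    let a := (PySem.List.pyGet? lst i).getD 0
    let b := (PySem.List.pyGet? lst (i + 1)).getD 0
    if 2 ≤ |a - b| then 0
    else if a = b then isRoadGoA lst size slide n (i + 1) (cnt + 1)
    else if a < b then
      if slide ≤ cnt then isRoadGoA lst size slide n (i + 1) 1 else 0
    else
      if size ≤ i + slide then 0
      else if PySem.Int.floordiv (PySem.List.slice lst (some (i + 1)) (some (i + 1 + slide))).sum slide = b
        then isRoadGoA lst size slide n (i + 1) (-slide + 1)
        else 0

def is_road (lst : List Int) (size : Int) (slide : Int) : Int :=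
  isRoadGoA lst size slide (size - 1).toNat 0 1

-- ===== PORT B =====
-- Source B's prefix-sum construction: running sum s, one cell appended per element.
def prefixesB (s : Int) : List Int → List Int
  | [] => []
  | h :: t => (s + h) :: prefixesB (s + h) t

-- Source B's scan: base is the index just before the usable flat run.
def isRoadGoB (lst pre : List Int) (size : Int) (slide : Int) : Nat → Int → Int → Int
  | 0, _, _ => 1
  | n + 1, i, base =>
    let d := (PySem.List.pyGet? lst (i + 1)).getD 0 - (PySem.List.pyGet? lst i).getD 0
    if d = 0 then isRoadGoB lst pre size slide n (i + 1) base
    else if 1 < d ∨ d < -1 then 0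
    else if d = 1 then
      if slide ≤ i - base then isRoadGoB lst pre size slide n (i + 1) i else 0
    else
      if size ≤ i + slide then 0
      else if PySem.Int.floordiv
          ((PySem.List.pyGet? pre (i + 1 + slide)).getD 0 - (PySem.List.pyGet? pre (i + 1)).getD 0) slide
          = (PySem.List.pyGet? lst (i + 1)).getD 0
        then isRoadGoB lst pre size slide n (i + 1) (i + slide)
        else 0

def is_road_alt (lst : List Int) (size : Int) (slide : Int) : Int :=
  isRoadGoB lst (0 :: prefixesB 0 lst) size slide (size - 1).toNat 0 (-1)

-- ===== PRECONDITION & SPEC =====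
-- Pre_ excludes size > len(lst) (A hits IndexError unless an early big height
-- difference aborts first, where B may also raise) and slide ≤ 0 (A raises
-- ZeroDivisionError on a downhill step when slide = 0, and for negative slide
-- A's empty/negative-slice average test is an accident of its implementation).
def Pre_is_road (lst : List Int) (size : Int) (slide : Int) : Prop :=
  (1 ≤ slide ∧ size ≤ (lst.length : Int)) ∨ size ≤ 1
instance (lst : List Int) (size : Int) (slide : Int) : Decidable (Pre_is_road lst size slide) := by
  unfold Pre_is_road; infer_instance

def pvWitness_is_road : List Int × Int × Int := ([2, 1, 1, 2, 2], 5, 2)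

def Spec_is_road (lst : List Int) (size : Int) (slide : Int) (out : Int) : Prop := out = is_road_alt lst size slide
instance (lst : List Int) (size : Int) (slide : Int) (out : Int) : Decidable (Spec_is_road lst size slide out) := by unfold Spec_is_road; infer_instance

-- ===== CLAIM (what is proved, stated in full; the proofs are below) =====
def Claim_equal_is_road : Prop := ∀ (lst : List Int) (size : Int) (slide : Int), Dom_is_road lst size slide → Pre_is_road lst size slide → Spec_is_road lst size slide (is_road lst size slide)

-- ===== LEMMAS AND PROOFS =====
lemma prefixesB_getElem? (lst : List Int) (s : Int) (k : Nat) (hk : k < lst.length) :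
    (prefixesB s lst)[k]? = some (s + (lst.take (k + 1)).sum) := by
  induction lst generalizing s k with
  | nil => simp at hk
  | cons h t ih =>
    cases k with
    | zero => simp [prefixesB]
    | succ m =>
      simp only [prefixesB, List.getElem?_cons_succ]
      rw [ih (s + h) m (by simpa using hk)]
      simp [List.take_succ_cons, add_assoc]

lemma pre_getD (lst : List Int) (k : Nat) (hk : k ≤ lst.length) :
    ((0 :: prefixesB 0 lst)[k]?).getD 0 = (lst.take k).sum := by
  cases k with
  | zero => simp
  | succ m =>
    simp only [List.getElem?_cons_succ]
    rw [prefixesB_getElem? lst 0 m (by omega)]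
    simp

lemma pre_window (lst : List Int) (a n : Nat) (h : a + n ≤ lst.length) :
    ((0 :: prefixesB 0 lst)[(a + n : Nat)]?).getD 0 - ((0 :: prefixesB 0 lst)[a]?).getD 0
      = ((lst.drop a).take n).sum := by
  rw [pre_getD lst (a + n) h, pre_getD lst a (by omega)]
  rw [List.take_add]
  simp

lemma goA_eq_goB (lst : List Int) (size slide : Int) (hs : 1 ≤ slide)
    (hlen : size ≤ (lst.length : Int)) :
    ∀ (n : Nat) (i base : Int), 0 ≤ i → i + (n : Int) = size - 1 →
      isRoadGoA lst size slide n i (i - base)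
        = isRoadGoB lst (0 :: prefixesB 0 lst) size slide n i base := by
  intro n
  induction n with
  | zero => intro i base _ _; rfl
  | succ m ih =>
    intro i base hi hn
    have hilen : i < (lst.length : Int) := by omega
    have hi1len : i + 1 < (lst.length : Int) := by omega
    have ha : PySem.List.pyGet? lst i = some (lst[i.toNat]'(by omega)) :=
      PySem.List.pyGet?_eq_some_getElem lst hi hilen
    have hb : PySem.List.pyGet? lst (i + 1) = some (lst[(i + 1).toNat]'(by omega)) :=
      PySem.List.pyGet?_eq_some_getElem lst (by omega) hi1len
    set a := lst[i.toNat]'(by omega) with hav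
    set b := lst[(i + 1).toNat]'(by omega) with hbv
    simp only [isRoadGoA, isRoadGoB, ha, hb, Option.getD_some]
    by_cases habs : 2 ≤ |a - b|
    · have h2 : 1 < b - a ∨ b - a < -1 := by
        rcases abs_cases (a - b) with ⟨he, _⟩ | ⟨he, _⟩ <;> omega
      have h0 : ¬ (b - a = 0) := by rcases h2 with h | h <;> omega
      rw [if_pos habs, if_neg h0, if_pos h2]
    · by_cases heq : a = b
      · have c0 : b - a = 0 := by omega
        rw [if_neg habs, if_pos heq, if_pos c0]
        have h := ih (i + 1) base (by omega) (by push_cast at hn ⊢; omega)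
        rw [show i + 1 - base = i - base + 1 by ring] at h
        exact h
      · by_cases hlt : a < b
        · have hd1 : b - a = 1 := by
            rcases abs_cases (a - b) with ⟨he, _⟩ | ⟨he, _⟩ <;> omega
          have c0 : ¬ (b - a = 0) := by omega
          have c2 : ¬ (1 < b - a ∨ b - a < -1) := by omega
          rw [if_neg habs, if_neg heq, if_pos hlt, if_neg c0, if_neg c2, if_pos hd1]
          by_cases hcap : slide ≤ i - base
          · rw [if_pos hcap, if_pos hcap]
            have h := ih (i + 1) i (by omega) (by push_cast at hn ⊢; omega)
            rw [show i + 1 - i = (1 : Int) by ring] at h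
            exact h
          · rw [if_neg hcap, if_neg hcap]
        · have hd1 : b - a = -1 := by
            rcases abs_cases (a - b) with ⟨he, _⟩ | ⟨he, _⟩ <;> omega
          have c0 : ¬ (b - a = 0) := by omega
          have c2 : ¬ (1 < b - a ∨ b - a < -1) := by omega
          have c3 : ¬ (b - a = 1) := by omega
          rw [if_neg habs, if_neg heq, if_neg hlt, if_neg c0, if_neg c2, if_neg c3]
          by_cases hg : size ≤ i + slide
          · rw [if_pos hg, if_pos hg]
          · rw [if_neg hg, if_neg hg]
            have hg' : i + slide < size := lt_of_not_ge hg
            -- A's slice sum equals B's prefix-array difference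
            have hSum : (PySem.List.slice lst (some (i + 1)) (some (i + 1 + slide))).sum
                = (PySem.List.pyGet? (0 :: prefixesB 0 lst) (i + 1 + slide)).getD 0
                  - (PySem.List.pyGet? (0 :: prefixesB 0 lst) (i + 1)).getD 0 := by
              rw [show i + 1 + slide = ((i.toNat + 1 + slide.toNat : Nat) : Int) by omega,
                  show i + 1 = ((i.toNat + 1 : Nat) : Int) by omega,
                  PySem.List.pyGet?_natCast, PySem.List.pyGet?_natCast,
                  PySem.List.slice_natCast,
                  pre_window lst (i.toNat + 1) slide.toNat (by omega),
                  show i.toNat + 1 + slide.toNat - (i.toNat + 1) = slide.toNat by omega]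
            rw [hSum]
            by_cases hc : PySem.Int.floordiv
                ((PySem.List.pyGet? (0 :: prefixesB 0 lst) (i + 1 + slide)).getD 0
                  - (PySem.List.pyGet? (0 :: prefixesB 0 lst) (i + 1)).getD 0) slide = b
            · rw [if_pos hc, if_pos hc]
              have h := ih (i + 1) (i + slide) (by omega) (by push_cast at hn ⊢; omega)
              rw [show i + 1 - (i + slide) = -slide + 1 by ring] at h
              exact h
            · rw [if_neg hc, if_neg hc]

-- ===== VERDICT (by name: the statement is the Claim_ definition above) =====
theorem is_road_spec : Claim_equal_is_road := by
  intro lst size slide _dom hpre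
  unfold Spec_is_road is_road is_road_alt
  by_cases hsz : size ≤ 1
  · have h0 : (size - 1).toNat = 0 := by omega
    rw [h0]; rfl
  · obtain ⟨hs, hlen'⟩ : 1 ≤ slide ∧ size ≤ (lst.length : Int) := by
      rcases hpre with h | h
      · exact h
      · omega
    have h := goA_eq_goB lst size slide hs hlen' (size - 1).toNat 0 (-1) le_rfl (by omega)
    rw [show (0 : Int) - (-1) = 1 by ring] at h
    exact h
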